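-- pv_equiv track=rewrite | github.com/ryan0980/20240312_AI_Lab2 | csp.py | calculate_L_shape
-- ===== SOURCE A (Python) =====
-- def calculate_L_shape(area, mode):
--     # Initialize the result dictionary with bush types as keys and 0 as values.
--     result = {bush_type: 0 for bush_type in range(1, 5)}
--
--     # Depending on the mode, slice the area to get the relevant portion.
--     if mode == 1:
--         relevant_portion = [row[1:] for row in area[:-1]]
--     elif mode == 2:
--         relevant_portion = [row[1:] for row in area[1:]]
--     elif mode == 3:
--         relevant_portion = [row[:-1] for row in area[:-1]]
--     elif mode == 4:
--         relevant_portion = [row[:-1] for row in area[1:]]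
--     else:
--         raise ValueError("Invalid mode for L-shape calculation.")
--
--     # Sum the occurrences of each bush type in the relevant portion.
--     for bush_type in result:
--         result[bush_type] = sum(row.count(bush_type) for row in relevant_portion)
--
--     return result
-- ===== SOURCE B (Python) =====
-- def calculate_L_shape(area, mode):
--     # Inclusion-exclusion: tally the whole grid once, then subtract the excluded
--     # row and the single excluded cell of every kept row -- no sliced subgrid.
--     if mode not in (1, 2, 3, 4):
--         raise ValueError("Invalid mode for L-shape calculation.")
--     drop_last_row = mode in (1, 3)    # A keeps area[:-1]; otherwise area[1:]
--     drop_first_cell = mode in (1, 2)  # A keeps row[1:]; otherwise row[:-1]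
--     counts = {1: 0, 2: 0, 3: 0, 4: 0}
--     for row in area:
--         for cell in row:
--             if cell in counts:
--                 counts[cell] += 1
--     if area:
--         for cell in (area[-1] if drop_last_row else area[0]):
--             if cell in counts:
--                 counts[cell] -= 1
--         for row in (area[:-1] if drop_last_row else area[1:]):
--             if row:
--                 dropped = row[0] if drop_first_cell else row[-1]
--                 if dropped in counts:
--                     counts[dropped] -= 1
--     return counts
-- ===== Notes on version B (the rewrite author's own statement) =====
-- stated objective: alternative
-- what changed: Instead of slicing out the relevant subgrid and running four per-type count scans over it, B tallies the whole grid once and subtracts by inclusion-exclusion the excluded row and the one excluded cell of each kept row.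
import Mathlib
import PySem

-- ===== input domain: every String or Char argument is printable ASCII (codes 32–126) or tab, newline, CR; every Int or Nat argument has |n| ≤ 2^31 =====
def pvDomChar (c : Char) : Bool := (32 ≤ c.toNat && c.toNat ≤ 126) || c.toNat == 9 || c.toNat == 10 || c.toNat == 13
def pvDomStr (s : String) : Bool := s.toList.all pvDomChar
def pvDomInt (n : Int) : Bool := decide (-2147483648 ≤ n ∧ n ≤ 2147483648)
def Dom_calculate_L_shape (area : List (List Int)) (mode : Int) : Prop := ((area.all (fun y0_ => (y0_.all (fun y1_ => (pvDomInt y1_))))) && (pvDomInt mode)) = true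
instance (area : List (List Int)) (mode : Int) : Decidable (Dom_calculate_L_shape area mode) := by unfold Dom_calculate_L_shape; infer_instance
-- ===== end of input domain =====

-- B counts by inclusion-exclusion over the FULL grid (one tally, then subtract the
-- excluded row and the one excluded cell of each kept row) instead of slicing out
-- the subgrid and running four per-type count scans (objective: alternative).

-- ===== PORT A =====
def calculate_L_shape (area : List (List Int)) (mode : Int) : List (Int × Int) :=
  -- result = {bush_type: 0 for bush_type in range(1, 5)}
  let result : PySem.Dict Int Int :=
    (PySem.List.pyRange 1 5 1).foldl (fun d bt => d.insert bt 0) PySem.Dict.empty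
  -- mode dispatch building relevant_portion (else branch: Python raises ValueError, excluded by Pre_)
  let relevant_portion : List (List Int) :=
    if mode == 1 then (PySem.List.slice area none (some (-1))).map (fun row => PySem.List.slice row (some 1) none)
    else if mode == 2 then (PySem.List.slice area (some 1) none).map (fun row => PySem.List.slice row (some 1) none)
    else if mode == 3 then (PySem.List.slice area none (some (-1))).map (fun row => PySem.List.slice row none (some (-1)))
    else if mode == 4 then (PySem.List.slice area (some 1) none).map (fun row => PySem.List.slice row none (some (-1)))
    else []
  -- for bush_type in result: result[bush_type] = sum(row.count(bush_type) for row in relevant_portion)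
  let result := result.keys.foldl
    (fun d bt => d.insert bt ((relevant_portion.map (fun row => (PySem.List.count row bt : Int))).sum)) result
  result.items

-- ===== PORT B =====
-- if cell in counts: counts[cell] += delta
def pvBump (d : PySem.Dict Int Int) (v delta : Int) : PySem.Dict Int Int :=
  if d.contains v then d.modify v 0 (· + delta) else d

-- loop body of B's kept-row pass: 'if row: dropped = row[0] if drop_first_cell else row[-1]; bump'
def pvDropKept (first : Bool) (d : PySem.Dict Int Int) (row : List Int) : PySem.Dict Int Int :=
  match row with
  | [] => d
  | c :: rest => pvBump d (if first then c else (c :: rest).getLast (List.cons_ne_nil c rest)) (-1)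

def calculate_L_shape_alt (area : List (List Int)) (mode : Int) : List (Int × Int) :=
  -- 'if mode not in (1,2,3,4): raise ValueError' — excluded by Pre_
  let dropLastRow := mode == 1 || mode == 3
  let dropFirstCell := mode == 1 || mode == 2
  let counts : PySem.Dict Int Int := PySem.Dict.ofList [(1, 0), (2, 0), (3, 0), (4, 0)]
  -- tally the whole grid
  let counts := area.foldl (fun d row => row.foldl (fun d cell => pvBump d cell 1) d) counts
  -- if area: subtract the excluded row and the dropped cell of each kept row
  let counts :=
    match area with
    | [] => counts
    | _ :: _ =>
      let excluded := ((if dropLastRow then PySem.List.pyGet? area (-1) else PySem.List.pyGet? area 0).getD [])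
      let counts := excluded.foldl (fun d cell => pvBump d cell (-1)) counts
      let kept := if dropLastRow then PySem.List.slice area none (some (-1)) else PySem.List.slice area (some 1) none
      kept.foldl (pvDropKept dropFirstCell) counts
  counts.items

-- ===== PRECONDITION & SPEC =====
-- Pre_ excludes exactly the modes outside 1..4, on which Python A raises ValueError.
def Pre_calculate_L_shape (area : List (List Int)) (mode : Int) : Prop :=
  mode = 1 ∨ mode = 2 ∨ mode = 3 ∨ mode = 4
instance (area : List (List Int)) (mode : Int) : Decidable (Pre_calculate_L_shape area mode) := by
  unfold Pre_calculate_L_shape; infer_instance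
def pvWitness_calculate_L_shape : List (List Int) × Int := ([[1, 2], [3, 4]], 1)

def Spec_calculate_L_shape (area : List (List Int)) (mode : Int) (out : List (Int × Int)) : Prop := out = calculate_L_shape_alt area mode
instance (area : List (List Int)) (mode : Int) (out : List (Int × Int)) : Decidable (Spec_calculate_L_shape area mode out) := by unfold Spec_calculate_L_shape; infer_instance

-- ===== CLAIM (what is proved, stated in full; the proofs are below) =====
def Claim_equal_calculate_L_shape : Prop := ∀ (area : List (List Int)) (mode : Int), Dom_calculate_L_shape area mode → Pre_calculate_L_shape area mode → Spec_calculate_L_shape area mode (calculate_L_shape area mode)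

-- ===== LEMMAS AND PROOFS =====

-- one bump on the literal four-key dict
theorem bump_mk (a b c d x k : Int) :
    pvBump (PySem.Dict.mk [(1, a), (2, b), (3, c), (4, d)]) x k
    = PySem.Dict.mk [(1, a + (if x = 1 then k else 0)), (2, b + (if x = 2 then k else 0)),
                     (3, c + (if x = 3 then k else 0)), (4, d + (if x = 4 then k else 0))] := by
  by_cases h1 : x = 1
  · subst h1; simp only [if_pos rfl, if_neg (by omega : ¬(1:Int) = 2), if_neg (by omega : ¬(1:Int) = 3), if_neg (by omega : ¬(1:Int) = 4), add_zero]; rfl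
  · by_cases h2 : x = 2
    · subst h2; simp only [if_pos rfl, if_neg (by omega : ¬(2:Int) = 1), if_neg (by omega : ¬(2:Int) = 3), if_neg (by omega : ¬(2:Int) = 4), add_zero]; rfl
    · by_cases h3 : x = 3
      · subst h3; simp only [if_pos rfl, if_neg (by omega : ¬(3:Int) = 1), if_neg (by omega : ¬(3:Int) = 2), if_neg (by omega : ¬(3:Int) = 4), add_zero]; rfl
      · by_cases h4 : x = 4
        · subst h4; simp only [if_pos rfl, if_neg (by omega : ¬(4:Int) = 1), if_neg (by omega : ¬(4:Int) = 2), if_neg (by omega : ¬(4:Int) = 3), add_zero]; rfl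
        · have : PySem.Dict.contains (PySem.Dict.mk [(1, a), (2, b), (3, c), (4, d)]) x = false := by
            simp [PySem.Dict.contains_mk]; omega
          simp [pvBump, this, h1, h2, h3, h4]

-- folding bumps of weight k over a list of cells adds k * count
theorem tally_cells (xs : List Int) (k a b c d : Int) :
    xs.foldl (fun d cell => pvBump d cell k) (PySem.Dict.mk [(1, a), (2, b), (3, c), (4, d)])
    = PySem.Dict.mk [(1, a + k * (xs.count 1 : Int)), (2, b + k * (xs.count 2 : Int)),
                     (3, c + k * (xs.count 3 : Int)), (4, d + k * (xs.count 4 : Int))] := by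
  induction xs generalizing a b c d with
  | nil => simp
  | cons x xs ih =>
    simp only [List.foldl_cons, bump_mk, ih, List.count_cons, beq_iff_eq]
    refine congrArg PySem.Dict.mk ?_
    simp only [List.cons.injEq, Prod.mk.injEq, and_true, true_and]
    refine ⟨?_, ?_, ?_, ?_⟩ <;> split_ifs <;> push_cast <;> ring

-- B's whole-grid tally adds the per-row count sums (weight 1)
theorem tally_grid (rows : List (List Int)) (a b c d : Int) :
    rows.foldl (fun d row => row.foldl (fun d cell => pvBump d cell 1) d)
      (PySem.Dict.mk [(1, a), (2, b), (3, c), (4, d)])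
    = PySem.Dict.mk [(1, a + ((rows.map (fun r => (r.count 1 : Int))).sum)),
                     (2, b + ((rows.map (fun r => (r.count 2 : Int))).sum)),
                     (3, c + ((rows.map (fun r => (r.count 3 : Int))).sum)),
                     (4, d + ((rows.map (fun r => (r.count 4 : Int))).sum))] := by
  induction rows generalizing a b c d with
  | nil => simp
  | cons r rows ih =>
    simp only [List.foldl_cons, tally_cells, ih, List.map_cons, List.sum_cons, one_mul]
    simp [add_assoc]

-- the dropped cell of a row, as a closed form
def pvDropped? (first : Bool) (r : List Int) : Option Int :=
  if first then r.head? else r.getLast?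

-- B's kept-row loop subtracts one per row whose dropped cell is the key
theorem tally_dropped (first : Bool) (rows : List (List Int)) (a b c d : Int) :
    rows.foldl (pvDropKept first)
      (PySem.Dict.mk [(1, a), (2, b), (3, c), (4, d)])
    = PySem.Dict.mk [(1, a - ((rows.filterMap (pvDropped? first)).count 1 : Int)),
                     (2, b - ((rows.filterMap (pvDropped? first)).count 2 : Int)),
                     (3, c - ((rows.filterMap (pvDropped? first)).count 3 : Int)),
                     (4, d - ((rows.filterMap (pvDropped? first)).count 4 : Int))] := by
  induction rows generalizing a b c d with
  | nil => cases first <;> simp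
  | cons r rows ih =>
    cases r with
    | nil =>
      have hnone : pvDropped? first [] = none := by cases first <;> simp [pvDropped?]
      simp only [List.foldl_cons, pvDropKept, List.filterMap_cons, hnone, ih]
    | cons c rest =>
      have hsome : pvDropped? first (c :: rest)
          = some (if first then c else (c :: rest).getLast (List.cons_ne_nil c rest)) := by
        cases first <;> simp [pvDropped?, List.getLast?_eq_getLast]
      simp only [List.foldl_cons, pvDropKept, bump_mk, ih, List.filterMap_cons, hsome,
        List.count_cons, beq_iff_eq]
      refine congrArg PySem.Dict.mk ?_
      simp only [List.cons.injEq, Prod.mk.injEq, and_true, true_and]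
      refine ⟨?_, ?_, ?_, ?_⟩ <;> split_ifs <;> push_cast <;> ring

-- count of the kept part of a row = count of the row minus its dropped cell's hit
theorem count_kept (first : Bool) (r : List Int) (t : Int) :
    (((if first then r.tail else r.dropLast).count t : Int))
    = ((r.count t : Int)) - (if pvDropped? first r = some t then 1 else 0) := by
  cases first with
  | true =>
    cases r with
    | nil => simp [pvDropped?]
    | cons c rest =>
      by_cases hct : c = t <;>
        simp [pvDropped?, hct, List.count_cons] <;> push_cast <;> ring
  | false =>
    cases r with
    | nil => simp [pvDropped?]
    | cons c rest =>
      obtain ⟨l, x, hlx⟩ : ∃ l x, c :: rest = l ++ [x] :=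
        ⟨(c :: rest).dropLast, (c :: rest).getLast (List.cons_ne_nil c rest),
          (List.dropLast_append_getLast (List.cons_ne_nil c rest)).symm⟩
      rw [hlx]
      simp only [pvDropped?, Bool.false_eq_true, if_false, List.dropLast_concat,
        List.getLast?_concat, List.count_append, Option.some.injEq, beq_iff_eq]
      have : List.count t [x] = if x = t then 1 else 0 := by
        simp [List.count_singleton, beq_iff_eq]
      rw [this]
      split_ifs <;> push_cast <;> ring

-- summed over a list of rows
theorem sum_count_kept (first : Bool) (rows : List (List Int)) (t : Int) :
    ((rows.map (fun r => ((if first then r.tail else r.dropLast).count t : Int))).sum)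
    = ((rows.map (fun r => (r.count t : Int))).sum) - ((rows.filterMap (pvDropped? first)).count t : Int) := by
  induction rows with
  | nil => simp
  | cons r rows ih =>
    simp only [List.map_cons, List.sum_cons, ih, List.filterMap_cons]
    rw [count_kept]
    cases h : pvDropped? first r with
    | none => push_cast; ring
    | some v =>
      simp only [h, List.count_cons, Option.some.injEq, beq_iff_eq]
      by_cases hv : v = t <;> simp [hv] <;> push_cast <;> ring

-- splitting a nonempty row list at its last row
theorem sum_count_dropLast (rows : List (List Int)) (h : rows ≠ []) (t : Int) :
    ((rows.dropLast.map (fun r => (r.count t : Int))).sum)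
    = ((rows.map (fun r => (r.count t : Int))).sum) - ((rows.getLast h).count t : Int) := by
  obtain ⟨l, x, hlx⟩ : ∃ l x, rows = l ++ [x] :=
    ⟨rows.dropLast, rows.getLast h, (List.dropLast_append_getLast h).symm⟩
  subst hlx
  simp [List.dropLast_concat, List.getLast_concat]

-- A's items, for any relevant portion (definitional)
theorem A_items (rel : List (List Int)) :
    ((((PySem.List.pyRange 1 5 1).foldl (fun d bt => d.insert bt 0) (PySem.Dict.empty : PySem.Dict Int Int)).keys.foldl
        (fun d bt => d.insert bt ((rel.map (fun row => (PySem.List.count row bt : Int))).sum))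
        ((PySem.List.pyRange 1 5 1).foldl (fun d bt => d.insert bt 0) (PySem.Dict.empty : PySem.Dict Int Int))).items)
    = [(1, (rel.map (fun row => (PySem.List.count row 1 : Int))).sum),
       (2, (rel.map (fun row => (PySem.List.count row 2 : Int))).sum),
       (3, (rel.map (fun row => (PySem.List.count row 3 : Int))).sum),
       (4, (rel.map (fun row => (PySem.List.count row 4 : Int))).sum)] := rfl

-- specializations of tally_dropped to the two dropped-cell choices
theorem tally_dropped_first (rows : List (List Int)) (a b c d : Int) :
    rows.foldl (pvDropKept true)
      (PySem.Dict.mk [(1, a), (2, b), (3, c), (4, d)])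
    = PySem.Dict.mk [(1, a - ((rows.filterMap List.head?).count 1 : Int)),
                     (2, b - ((rows.filterMap List.head?).count 2 : Int)),
                     (3, c - ((rows.filterMap List.head?).count 3 : Int)),
                     (4, d - ((rows.filterMap List.head?).count 4 : Int))] := by
  have h := tally_dropped true rows a b c d
  simpa [pvDropped?] using h

theorem tally_dropped_last (rows : List (List Int)) (a b c d : Int) :
    rows.foldl (pvDropKept false)
      (PySem.Dict.mk [(1, a), (2, b), (3, c), (4, d)])
    = PySem.Dict.mk [(1, a - ((rows.filterMap List.getLast?).count 1 : Int)),
                     (2, b - ((rows.filterMap List.getLast?).count 2 : Int)),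
                     (3, c - ((rows.filterMap List.getLast?).count 3 : Int)),
                     (4, d - ((rows.filterMap List.getLast?).count 4 : Int))] := by
  have h := tally_dropped false rows a b c d
  simpa [pvDropped?] using h

-- specializations of sum_count_kept
theorem sum_count_tail (rows : List (List Int)) (t : Int) :
    ((rows.map (fun r => (r.tail.count t : Int))).sum)
    = ((rows.map (fun r => (r.count t : Int))).sum) - ((rows.filterMap List.head?).count t : Int) := by
  have h := sum_count_kept true rows t
  simpa [pvDropped?] using h

theorem sum_count_dropLast_cells (rows : List (List Int)) (t : Int) :
    ((rows.map (fun r => (r.dropLast.count t : Int))).sum)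
    = ((rows.map (fun r => (r.count t : Int))).sum) - ((rows.filterMap List.getLast?).count t : Int) := by
  have h := sum_count_kept false rows t
  simpa [pvDropped?] using h

-- ===== VERDICT (by name: the statement is the Claim_ definition above) =====
theorem calculate_L_shape_spec : Claim_equal_calculate_L_shape := by
  intro area mode _ hpre
  unfold Spec_calculate_L_shape calculate_L_shape calculate_L_shape_alt
  rcases hpre with rfl | rfl | rfl | rfl <;> cases area with
  | nil => decide
  | cons x xs => ?_
  all_goals
    simp only [show ((1:Int) == 1) = true from rfl, show ((1:Int) == 2) = false from rfl,
      show ((1:Int) == 3) = false from rfl, show ((1:Int) == 4) = false from rfl,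
      show ((2:Int) == 1) = false from rfl, show ((2:Int) == 2) = true from rfl,
      show ((2:Int) == 3) = false from rfl, show ((2:Int) == 4) = false from rfl,
      show ((3:Int) == 1) = false from rfl, show ((3:Int) == 2) = false from rfl,
      show ((3:Int) == 3) = true from rfl, show ((3:Int) == 4) = false from rfl,
      show ((4:Int) == 1) = false from rfl, show ((4:Int) == 2) = false from rfl,
      show ((4:Int) == 3) = false from rfl, show ((4:Int) == 4) = true from rfl,
      Bool.false_or, Bool.true_or, Bool.or_false, Bool.or_true, if_true, if_false,
      Bool.true_eq_false, Bool.false_eq_true, A_items]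
  -- mode 1: kept = dropLast, drop first cell
  · rw [show (PySem.Dict.ofList [((1:Int), (0:Int)), (2, 0), (3, 0), (4, 0)])
        = PySem.Dict.mk [(1, 0), (2, 0), (3, 0), (4, 0)] from rfl,
      tally_grid, PySem.List.pyGet?_neg_one,
      List.getLast?_eq_some_getLast (List.cons_ne_nil x xs), Option.getD_some,
      tally_cells, PySem.List.slice_to_neg_one, tally_dropped_first]
    simp only [PySem.List.slice_from_one, List.map_map, Function.comp_def, PySem.List.count_eq]
    simp only [List.cons.injEq, Prod.mk.injEq, and_true, true_and]
    refine ⟨?_, ?_, ?_, ?_⟩ <;>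
      rw [sum_count_tail, sum_count_dropLast (x :: xs) (List.cons_ne_nil x xs)] <;> push_cast <;> ring
  -- mode 2: kept = tail, drop first cell
  · rw [show (PySem.Dict.ofList [((1:Int), (0:Int)), (2, 0), (3, 0), (4, 0)])
        = PySem.Dict.mk [(1, 0), (2, 0), (3, 0), (4, 0)] from rfl,
      tally_grid, PySem.List.pyGet?_zero_cons, Option.getD_some,
      tally_cells, PySem.List.slice_from_one, List.tail_cons, tally_dropped_first]
    simp only [PySem.List.slice_from_one, List.map_map, Function.comp_def, PySem.List.count_eq,
      List.map_cons, List.sum_cons]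
    simp only [List.cons.injEq, Prod.mk.injEq, and_true, true_and]
    refine ⟨?_, ?_, ?_, ?_⟩ <;> rw [sum_count_tail] <;> push_cast <;> ring
  -- mode 3: kept = dropLast, drop last cell
  · rw [show (PySem.Dict.ofList [((1:Int), (0:Int)), (2, 0), (3, 0), (4, 0)])
        = PySem.Dict.mk [(1, 0), (2, 0), (3, 0), (4, 0)] from rfl,
      tally_grid, PySem.List.pyGet?_neg_one,
      List.getLast?_eq_some_getLast (List.cons_ne_nil x xs), Option.getD_some,
      tally_cells, PySem.List.slice_to_neg_one, tally_dropped_last]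
    simp only [PySem.List.slice_to_neg_one, List.map_map, Function.comp_def, PySem.List.count_eq]
    simp only [List.cons.injEq, Prod.mk.injEq, and_true, true_and]
    refine ⟨?_, ?_, ?_, ?_⟩ <;>
      rw [sum_count_dropLast_cells, sum_count_dropLast (x :: xs) (List.cons_ne_nil x xs)] <;>
        push_cast <;> ring
  -- mode 4: kept = tail, drop last cell
  · rw [show (PySem.Dict.ofList [((1:Int), (0:Int)), (2, 0), (3, 0), (4, 0)])
        = PySem.Dict.mk [(1, 0), (2, 0), (3, 0), (4, 0)] from rfl,
      tally_grid, PySem.List.pyGet?_zero_cons, Option.getD_some,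
      tally_cells, PySem.List.slice_from_one, List.tail_cons, tally_dropped_last]
    simp only [PySem.List.slice_to_neg_one, List.map_map, Function.comp_def, PySem.List.count_eq,
      List.map_cons, List.sum_cons]
    simp only [List.cons.injEq, Prod.mk.injEq, and_true, true_and]
    refine ⟨?_, ?_, ?_, ?_⟩ <;> rw [sum_count_dropLast_cells] <;> push_cast <;> ring
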